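-- pv_equiv track=rewrite | github.com/5uperb0y/rosalind | code/sseq/sseq.py | find_spliced_motifs_dp
-- ===== SOURCE A (Python) =====
-- def find_spliced_motifs_dp(dna, motif):
--     """Finding all positions of a spliced motif in a DNA string using
--     dynamic programming.
--
--     Args:
--         dna (str): A DNA string.
--         motif (str): A DNA motif to be found in the dna string.
--
--     Return:
--         set: A set of 1-based positions where the motif is found as
--               a subsequence in the DNA string.
--     """
--     dp = [set() for _ in range(len(motif) + 1)]
--     dp[0].add(())
--     for i in range(len(dna)):
--         for j in reversed(range(len(motif))):
--             if dna[i] == motif[j]: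
--                 for prev in dp[j]:
--                     dp[j + 1].add(prev + (i + 1, ) )
--             else:
--                 pass
--     return dp[-1]
-- ===== SOURCE B (Python) =====
-- def find_spliced_motifs_dp(dna, motif):
--     """Finding all positions of a spliced motif in a DNA string by
--     top-down recursion from the right end of the motif.
--
--     Returns the set of 1-based position tuples at which motif occurs
--     as a subsequence of dna.
--     """
--     def emb(j, e):
--         # all position tuples embedding motif[:j] into dna[:e]
--         if j == 0:
--             return [()]
--         return [prev + (i + 1,)
--                 for i in range(e)
--                 if dna[i] == motif[j - 1]
--                 for prev in emb(j - 1, i)]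
--     return set(emb(len(motif), len(dna)))
-- ===== Notes on version B (the rewrite author's own statement) =====
-- stated objective: alternative
-- what changed: Replaces the bottom-up DP table of sets (mutated in place column by column over the DNA) with a direct top-down recursion emb(j,e) that enumerates all embeddings of motif[:j] into dna[:e] from the right end of the motif; no table is kept.
import Mathlib
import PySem

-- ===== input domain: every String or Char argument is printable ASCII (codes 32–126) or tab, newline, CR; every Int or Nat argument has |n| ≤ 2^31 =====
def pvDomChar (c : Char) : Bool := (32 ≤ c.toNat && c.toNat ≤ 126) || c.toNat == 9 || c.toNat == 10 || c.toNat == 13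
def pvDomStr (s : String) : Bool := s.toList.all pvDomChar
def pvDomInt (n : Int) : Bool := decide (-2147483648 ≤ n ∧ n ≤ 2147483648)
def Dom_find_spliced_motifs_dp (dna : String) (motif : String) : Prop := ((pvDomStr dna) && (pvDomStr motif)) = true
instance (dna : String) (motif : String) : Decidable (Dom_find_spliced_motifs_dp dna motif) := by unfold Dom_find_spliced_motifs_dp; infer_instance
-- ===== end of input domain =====

-- B replaces A's bottom-up DP over a mutable list of sets by a direct top-down
-- recursion over the motif (a different decomposition, not claimed faster).

-- ===== PORT A =====
def find_spliced_motifs_dp (dna : String) (motif : String) : List (List Int) :=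
  let dnaL := dna.toList
  let motifL := motif.toList
  -- dp = [set() for _ in range(len(motif) + 1)]
  let dp0 : List (PySem.Set (List Int)) :=
    (PySem.List.pyRange 0 (motifL.length + 1) 1).map (fun _ => PySem.Set.empty)
  -- dp[0].add(())
  let dp1 := PySem.List.pySetD dp0 0
    (PySem.Set.add (PySem.List.pyGetD dp0 0 PySem.Set.empty) [])
  let dp := (PySem.List.pyRange 0 dnaL.length 1).foldl (fun dp i =>
      ((PySem.List.pyRange 0 motifL.length 1).reverse).foldl (fun dp j =>
        -- dna[i], motif[j], dp[j], dp[j+1]: indices always in range here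
        if PySem.List.pyGetD dnaL i ' ' == PySem.List.pyGetD motifL j ' ' then
          PySem.List.pySetD dp (j + 1)
            ((PySem.List.pyGetD dp j PySem.Set.empty).foldl
              (fun s prev => PySem.Set.add s (prev ++ [i + 1]))
              (PySem.List.pyGetD dp (j + 1) PySem.Set.empty))
        else dp) dp) dp1
  PySem.List.pyGetD dp (-1) PySem.Set.empty  -- dp[-1]; dp is nonempty

-- ===== PORT B =====
-- emb(j, e): all position tuples embedding motif[:j] into dna[:e]
-- (dna[i] / motif[j-1] are always in range in Source B; ported via getElem? compared on Option)
def pvEmb (dna motif : List Char) (j e : Nat) : List (List Int) :=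
  match j with
  | 0 => [[]]
  | j' + 1 =>
      (List.range e).flatMap (fun i =>
        if dna[i]? == motif[j']? then
          (pvEmb dna motif j' i).map (fun prev => prev ++ [((i : Int) + 1)])
        else [])

def find_spliced_motifs_dp_alt (dna : String) (motif : String) : List (List Int) :=
  PySem.Set.ofList (pvEmb dna.toList motif.toList motif.toList.length dna.toList.length)

-- ===== PRECONDITION & SPEC =====
def Spec_find_spliced_motifs_dp (dna : String) (motif : String) (out : List (List Int)) : Prop := out = find_spliced_motifs_dp_alt dna motif
instance (dna : String) (motif : String) (out : List (List Int)) : Decidable (Spec_find_spliced_motifs_dp dna motif out) := by unfold Spec_find_spliced_motifs_dp; infer_instance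

-- ===== CLAIM (what is proved, stated in full; the proofs are below) =====
def Claim_equal_find_spliced_motifs_dp : Prop := ∀ (dna : String) (motif : String), Dom_find_spliced_motifs_dp dna motif → Spec_find_spliced_motifs_dp dna motif (find_spliced_motifs_dp dna motif)


-- ===== LEMMAS AND PROOFS =====

-- one step of pvEmb in its second argument
theorem pvEmb_succ_right (dna motif : List Char) (j e : Nat) :
    pvEmb dna motif (j + 1) (e + 1) =
      pvEmb dna motif (j + 1) e ++
        (if dna[e]? == motif[j]? then
          (pvEmb dna motif j e).map (fun prev => prev ++ [((e : Int) + 1)])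
        else []) := by
  simp [pvEmb, List.range_succ]

-- every entry of an embedding of motif[:j] into dna[:e] lies in [1, e]
theorem pvEmb_mem_bound (dna motif : List Char) (j : Nat) :
    ∀ e l x, l ∈ pvEmb dna motif j e → x ∈ l → 1 ≤ x ∧ x ≤ (e : Int) := by
  induction j with
  | zero =>
      intro e l x hl hx
      simp [pvEmb] at hl
      subst hl; simp at hx
  | succ j ih =>
      intro e l x hl hx
      simp only [pvEmb, List.mem_flatMap, List.mem_range] at hl
      obtain ⟨i, hi, hl⟩ := hl
      by_cases hc : dna[i]? == motif[j]?
      · rw [if_pos hc] at hl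
        obtain ⟨prev, hprev, rfl⟩ := List.mem_map.mp hl
        rcases List.mem_append.mp hx with hx | hx
        · have hb := ih i prev x hprev hx
          omega
        · simp at hx
          subst hx
          omega
      · rw [if_neg hc] at hl
        simp at hl

theorem pvEmb_nodup (dna motif : List Char) (j : Nat) :
    ∀ e, (pvEmb dna motif j e).Nodup := by
  induction j with
  | zero => intro e; simp [pvEmb]
  | succ j ih =>
      intro e
      induction e with
      | zero => simp [pvEmb]
      | succ e ihe =>
          rw [pvEmb_succ_right]
          refine List.Nodup.append ihe ?_ ?_
          · split
            · exact (ih e).map (fun a b h => List.append_cancel_right h)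
            · exact List.nodup_nil
          · intro l h1 h2
            have hmem : ((e : Int) + 1) ∈ l := by
              split at h2
              · obtain ⟨prev, _, rfl⟩ := List.mem_map.mp h2
                simp
              · simp at h2
            have := (pvEmb_mem_bound dna motif (j + 1) e l ((e : Int) + 1) h1 hmem).2
            omega

-- helper names for A's loop bodies (definitionally equal to the lambdas in the port)
def pvStep (d t : List Char) (i : Int) (dp : List (PySem.Set (List Int))) (j : Int) :
    List (PySem.Set (List Int)) :=
  if PySem.List.pyGetD d i ' ' == PySem.List.pyGetD t j ' ' then
    PySem.List.pySetD dp (j + 1)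
      ((PySem.List.pyGetD dp j PySem.Set.empty).foldl
        (fun s prev => PySem.Set.add s (prev ++ [i + 1]))
        (PySem.List.pyGetD dp (j + 1) PySem.Set.empty))
  else dp

def pvOuterStep (d t : List Char) (dp : List (PySem.Set (List Int))) (i : Int) :
    List (PySem.Set (List Int)) :=
  ((PySem.List.pyRange 0 t.length 1).reverse).foldl (pvStep d t i) dp

-- the dp table after the first e characters of dna have been processed
def pvTable (d t : List Char) (e : Nat) : List (PySem.Set (List Int)) :=
  (List.range (t.length + 1)).map (fun j => pvEmb d t j e)

-- mid-state of the inner (reversed) loop: columns above k already advanced to e+1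
def pvMid (d t : List Char) (e k : Nat) : List (PySem.Set (List Int)) :=
  (List.range (t.length + 1)).map
    (fun j => if j ≤ k then pvEmb d t j e else pvEmb d t j (e + 1))

theorem pvMid_top (d t : List Char) (e : Nat) : pvMid d t e t.length = pvTable d t e := by
  unfold pvMid pvTable
  apply List.map_congr_left
  intro j hj
  rw [List.mem_range] at hj
  rw [if_pos (by omega)]

theorem pvMid_zero (d t : List Char) (e : Nat) : pvMid d t e 0 = pvTable d t (e + 1) := by
  unfold pvMid pvTable
  apply List.map_congr_left
  intro j hj
  rcases Nat.eq_zero_or_pos j with rfl | hjpos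
  · rw [if_pos (le_refl 0)]; rfl
  · rw [if_neg (by omega)]

-- one inner step advances column k+1
theorem pvStep_mid (d t : List Char) (e k : Nat) (he : e < d.length) (hk : k < t.length) :
    pvStep d t (e : Int) (pvMid d t e (k + 1)) (k : Int) = pvMid d t e k := by
  have hd : PySem.List.pyGetD d (e : Int) ' ' = d[e] := by
    rw [PySem.List.pyGetD_natCast, List.getD_eq_getElem _ _ he]
  have ht : PySem.List.pyGetD t (k : Int) ' ' = t[k] := by
    rw [PySem.List.pyGetD_natCast, List.getD_eq_getElem _ _ hk]
  have hget : ∀ (p : Nat), p < t.length + 1 →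
      PySem.List.pyGetD (pvMid d t e (k + 1)) (p : Int) PySem.Set.empty =
        (if p ≤ k + 1 then pvEmb d t p e else pvEmb d t p (e + 1)) := by
    intro p hp
    rw [PySem.List.pyGetD_natCast]
    unfold pvMid
    rw [List.getD_eq_getElem _ _ (by simpa using hp)]
    simp
  have hopt : (d[e]? == t[k]?) = (d[e] == t[k]) := by
    rw [List.getElem?_eq_getElem he, List.getElem?_eq_getElem hk]
    rfl
  unfold pvStep
  rw [hd, ht]
  by_cases hc : (d[e] == t[k]) = true
  · rw [if_pos hc]
    -- the value written into column k+1
    have hv :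
        ((PySem.List.pyGetD (pvMid d t e (k + 1)) (k : Int) PySem.Set.empty).foldl
            (fun s prev => PySem.Set.add s (prev ++ [(e : Int) + 1]))
            (PySem.List.pyGetD (pvMid d t e (k + 1)) ((k : Int) + 1) PySem.Set.empty)) =
          pvEmb d t (k + 1) (e + 1) := by
      have h1 := hget k (by omega)
      have h2 := hget (k + 1) (by omega)
      rw [h1] at *
      have h2' : PySem.List.pyGetD (pvMid d t e (k + 1)) ((k : Int) + 1) PySem.Set.empty =
          pvEmb d t (k + 1) e := by
        rw [show ((k : Int) + 1) = ((k + 1 : Nat) : Int) by push_cast; ring, h2]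
        rw [if_pos (le_refl (k + 1))]
      rw [h2', if_pos (by omega)]
      rw [← PySem.Set.update_map_eq_foldl_add]
      rw [PySem.Set.update_eq_append_of_disjoint]
      · rw [pvEmb_succ_right, hopt, if_pos hc]
      · exact (pvEmb_nodup d t k e).map (fun a b h => List.append_cancel_right h)
      · intro x hx hx'
        obtain ⟨prev, _, rfl⟩ := List.mem_map.mp hx
        have hmem : ((e : Int) + 1) ∈ prev ++ [(e : Int) + 1] := by simp
        have := (pvEmb_mem_bound d t (k + 1) e _ _ hx' hmem).2
        omega
    rw [hv]
    rw [show ((k : Int) + 1) = ((k + 1 : Nat) : Int) by push_cast; ring]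
    rw [PySem.List.pySetD_natCast]
    -- pointwise comparison of the updated table with pvMid e k
    apply List.ext_getElem
    · simp [pvMid]
    · intro p hp1 hp2
      rw [List.getElem_set]
      by_cases hpk : k + 1 = p
      · rw [if_pos hpk]
        subst hpk
        simp only [pvMid, List.getElem_map, List.getElem_range]
        rw [if_neg (by omega)]
      · rw [if_neg hpk]
        simp only [pvMid, List.getElem_map, List.getElem_range]
        by_cases hle : p ≤ k
        · rw [if_pos (by omega), if_pos hle]
        · rw [if_neg (by omega), if_neg hle]
  · rw [if_neg hc]
    -- no match: column k+1 is unchanged from e to e+1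
    unfold pvMid
    apply List.map_congr_left
    intro j hj
    rw [List.mem_range] at hj
    by_cases hjk : j ≤ k
    · rw [if_pos hjk, if_pos (by omega)]
    · by_cases hjk1 : j ≤ k + 1
      · have hj1 : j = k + 1 := by omega
        subst hj1
        rw [if_pos (le_refl (k + 1)), if_neg (by omega)]
        rw [pvEmb_succ_right, hopt, if_neg hc, List.append_nil]
      · rw [if_neg hjk, if_neg hjk1]

-- the inner reversed loop, from column k down to 1
theorem pvInner (d t : List Char) (e : Nat) (he : e < d.length) :
    ∀ k, k ≤ t.length →
      ((PySem.List.pyRange 0 (k : Int) 1).reverse).foldl (pvStep d t (e : Int))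
          (pvMid d t e k) = pvMid d t e 0 := by
  intro k
  induction k with
  | zero => intro _; rw [PySem.List.pyRange_one_eq_nil (by omega)]; rfl
  | succ k ih =>
      intro hk
      rw [show ((k + 1 : Nat) : Int) = ((k : Int) + 1) by push_cast; ring]
      rw [PySem.List.pyRange_one_succ_right (by positivity)]
      rw [List.reverse_append, List.reverse_singleton, List.singleton_append, List.foldl_cons]
      rw [pvStep_mid d t e k he (by omega)]
      exact ih (by omega)

-- the outer loop over dna
theorem pvOuterLoop (d t : List Char) :
    ∀ (c a : Nat), a + c = d.length →
      (PySem.List.pyRange (a : Int) (d.length : Int) 1).foldl (pvOuterStep d t)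
          (pvTable d t a) = pvTable d t d.length := by
  intro c
  induction c with
  | zero =>
      intro a ha
      rw [PySem.List.pyRange_one_eq_nil (by omega)]
      simp only [List.foldl_nil]
      rw [show a = d.length by omega]
  | succ c ih =>
      intro a ha
      rw [PySem.List.pyRange_one_cons (by exact_mod_cast Nat.lt_of_lt_of_le (Nat.lt_succ_self a) (by omega) : (a : Int) < (d.length : Int))]
      rw [List.foldl_cons]
      have hstep : pvOuterStep d t (pvTable d t a) (a : Int) = pvTable d t (a + 1) := by
        unfold pvOuterStep
        rw [← pvMid_top d t a, pvInner d t a (by omega) t.length (le_refl _), pvMid_zero]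
      rw [hstep]
      rw [show ((a : Int) + 1) = ((a + 1 : Nat) : Int) by push_cast; ring]
      exact ih (a + 1) (by omega)

-- the initial table equals pvTable at 0
theorem pvInit (d t : List Char) :
    PySem.List.pySetD
        ((PySem.List.pyRange 0 ((t.length : Int) + 1) 1).map
          (fun _ => (PySem.Set.empty : PySem.Set (List Int)))) 0
        (PySem.Set.add
          (PySem.List.pyGetD
            ((PySem.List.pyRange 0 ((t.length : Int) + 1) 1).map
              (fun _ => (PySem.Set.empty : PySem.Set (List Int)))) 0 PySem.Set.empty)
          []) = pvTable d t 0 := by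
  rw [PySem.List.pyRange_one_cons (by positivity : (0 : Int) < (t.length : Int) + 1)]
  simp only [List.map_cons]
  rw [PySem.List.pySetD_of_nonneg _ _ le_rfl]
  simp only [Int.toNat_zero, List.set_cons_zero, PySem.List.pyGetD_zero, List.getD_cons_zero]
  apply List.ext_getElem
  · simp [pvTable, PySem.List.length_pyRange_one]
  · intro p hp1 hp2
    rcases p with _ | q
    · simp only [List.getElem_cons_zero, pvTable, List.getElem_map, List.getElem_range]
      rfl
    · simp only [List.getElem_cons_succ, List.getElem_map]
      show PySem.Set.empty = (pvTable d t 0)[q + 1]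
      simp only [pvTable, List.getElem_map, List.getElem_range]
      simp [pvEmb]

-- ===== VERDICT (by name: the statement is the Claim_ definition above) =====
theorem find_spliced_motifs_dp_spec : Claim_equal_find_spliced_motifs_dp := by
  intro dna motif _
  unfold Spec_find_spliced_motifs_dp
  show find_spliced_motifs_dp dna motif = find_spliced_motifs_dp_alt dna motif
  have hA : find_spliced_motifs_dp dna motif =
      PySem.List.pyGetD
        ((PySem.List.pyRange 0 (dna.toList.length : Int) 1).foldl
          (pvOuterStep dna.toList motif.toList)
          (PySem.List.pySetD
            ((PySem.List.pyRange 0 ((motif.toList.length : Int) + 1) 1).map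
              (fun _ => (PySem.Set.empty : PySem.Set (List Int)))) 0
            (PySem.Set.add
              (PySem.List.pyGetD
                ((PySem.List.pyRange 0 ((motif.toList.length : Int) + 1) 1).map
                  (fun _ => (PySem.Set.empty : PySem.Set (List Int)))) 0 PySem.Set.empty)
              []))) (-1) PySem.Set.empty := rfl
  have hout := pvOuterLoop dna.toList motif.toList dna.toList.length 0 (by omega)
  rw [Nat.cast_zero] at hout
  rw [hA, pvInit dna.toList motif.toList, hout]
  have hne : pvTable dna.toList motif.toList dna.toList.length ≠ [] := by
    simp [pvTable]
  rw [PySem.List.pyGetD_neg_one _ _ hne]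
  unfold find_spliced_motifs_dp_alt
  rw [PySem.Set.ofList_eq_self_of_nodup _ (pvEmb_nodup _ _ _ _)]
  unfold pvTable
  rw [List.getLast_eq_getElem]
  simp
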